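-- pv_equiv track=rewrite | github.com/benz206/lattice | backend/app/services/chunker.py | _compute_pages
-- ===== SOURCE A (Python) =====
-- def _compute_pages(
--     char_start: int, char_end: int, page_offsets: list[int], total_len: int
-- ) -> tuple[int, int]:
--     """Return 1-indexed (page_start, page_end) for a [char_start, char_end) span."""
--     if not page_offsets:
--         return 1, 1
--     page_start = 1
--     for i, offset in enumerate(page_offsets):
--         if offset <= char_start:
--             page_start = i + 1
--         else:
--             break
--     page_end = page_start
--     end_probe = max(char_end - 1, char_start)
--     for i, offset in enumerate(page_offsets):
--         if offset <= end_probe: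
--             page_end = i + 1
--         else:
--             break
--     return page_start, page_end
-- ===== SOURCE B (Python) =====
-- def _compute_pages(
--     char_start: int, char_end: int, page_offsets: list[int], total_len: int
-- ) -> tuple[int, int]:
--     """Return 1-indexed (page_start, page_end) for a [char_start, char_end) span.
--
--     Single fused pass: ke counts the leading offsets <= end_probe; ks tracks,
--     inside that same prefix, how long the offsets also stay <= char_start.
--     """
--     end_probe = char_end - 1 if char_end - 1 > char_start else char_start
--     ks = ke = 0
--     for off in page_offsets:
--         if off > end_probe:
--             break
--         ke += 1
--         if ks == ke - 1 and off <= char_start: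
--             ks = ke
--     return max(ks, 1), max(ke, 1)
-- ===== Notes on version B (the rewrite author's own statement) =====
-- stated objective: alternative
-- what changed: Replaces A's two separate enumerate-and-break scans (one for page_start, one for page_end) by a single fused pass that stops at the first offset beyond end_probe and maintains both counters at once, with the result expressed via max(.,1) instead of per-loop defaults.
import Mathlib
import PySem

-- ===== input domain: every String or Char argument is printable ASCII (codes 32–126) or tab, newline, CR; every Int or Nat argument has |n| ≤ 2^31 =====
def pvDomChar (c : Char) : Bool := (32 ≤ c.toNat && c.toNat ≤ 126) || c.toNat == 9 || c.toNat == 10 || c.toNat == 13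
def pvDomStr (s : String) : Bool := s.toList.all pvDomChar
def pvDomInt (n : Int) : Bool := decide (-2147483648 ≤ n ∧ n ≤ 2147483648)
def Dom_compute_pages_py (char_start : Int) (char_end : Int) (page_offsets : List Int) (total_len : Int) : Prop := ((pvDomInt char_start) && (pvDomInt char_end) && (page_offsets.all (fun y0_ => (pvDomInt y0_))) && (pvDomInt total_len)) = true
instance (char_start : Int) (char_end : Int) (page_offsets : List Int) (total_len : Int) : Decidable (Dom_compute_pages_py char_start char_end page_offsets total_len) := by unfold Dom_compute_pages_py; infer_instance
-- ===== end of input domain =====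

-- B fuses A's two enumerate-and-break scans into one pass maintaining both counters (alternative decomposition, same cost).


-- ===== PORT A =====
-- A's 'for i, offset in enumerate(page_offsets): if offset <= limit: res = i + 1 else: break'
def pvScanA (limit : Int) : List Int → Int → Int → Int
  | [], _, acc => acc
  | o :: rest, i, acc => if o ≤ limit then pvScanA limit rest (i + 1) (i + 1) else acc

def compute_pages_py (char_start : Int) (char_end : Int) (page_offsets : List Int) (total_len : Int) : List Int :=
  if page_offsets = [] then [1, 1]
  else
    let page_start := pvScanA char_start page_offsets 0 1
    let end_probe := max (char_end - 1) char_start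
    let page_end := pvScanA end_probe page_offsets 0 page_start
    [page_start, page_end]

-- ===== PORT B =====
-- B's single fused loop over page_offsets carrying (ks, ke)
def pvScanB (char_start : Int) (end_probe : Int) : List Int → Int → Int → Int × Int
  | [], ks, ke => (ks, ke)
  | o :: rest, ks, ke =>
    if o > end_probe then (ks, ke)
    else
      let ke' := ke + 1
      let ks' := if ks = ke' - 1 ∧ o ≤ char_start then ke' else ks
      pvScanB char_start end_probe rest ks' ke'

def compute_pages_py_alt (char_start : Int) (char_end : Int) (page_offsets : List Int) (total_len : Int) : List Int :=
  let end_probe := if char_end - 1 > char_start then char_end - 1 else char_start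
  let p := pvScanB char_start end_probe page_offsets 0 0
  [max p.1 1, max p.2 1]

-- ===== PRECONDITION & SPEC =====
def Spec_compute_pages_py (char_start : Int) (char_end : Int) (page_offsets : List Int) (total_len : Int) (out : List Int) : Prop := out = compute_pages_py_alt char_start char_end page_offsets total_len
instance (char_start : Int) (char_end : Int) (page_offsets : List Int) (total_len : Int) (out : List Int) : Decidable (Spec_compute_pages_py char_start char_end page_offsets total_len out) := by unfold Spec_compute_pages_py; infer_instance

-- ===== CLAIM (what is proved, stated in full; the proofs are below) =====
def Claim_equal_compute_pages_py : Prop := ∀ (char_start : Int) (char_end : Int) (page_offsets : List Int) (total_len : Int), Dom_compute_pages_py char_start char_end page_offsets total_len → Spec_compute_pages_py char_start char_end page_offsets total_len (compute_pages_py char_start char_end page_offsets total_len)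

-- ===== LEMMAS AND PROOFS =====

-- length of the prefix of l whose elements are ≤ limit
def pvTW (limit : Int) (l : List Int) : Nat := (l.takeWhile (fun o => o ≤ limit)).length

theorem pvScanA_eq (limit : Int) (l : List Int) (i acc : Int) :
    pvScanA limit l i acc = if pvTW limit l = 0 then acc else i + (pvTW limit l : Int) := by
  induction l generalizing i acc with
  | nil => simp [pvScanA, pvTW]
  | cons o rest ih =>
    by_cases h : o ≤ limit
    · simp only [pvScanA, pvTW, List.takeWhile, h, decide_true, if_true, List.length_cons]
      rw [ih]
      simp only [pvTW]
      split <;> rename_i h2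
      · simp only [h2]; push_cast; omega
      · simp only [Nat.add_one_ne_zero, if_false]; push_cast; omega
    · simp [pvScanA, pvTW, List.takeWhile, h]

theorem pvScanB_stuck (cs ep : Int) (l : List Int) (ks ke : Int) (h : ks < ke) :
    pvScanB cs ep l ks ke = (ks, ke + (pvTW ep l : Int)) := by
  induction l generalizing ke with
  | nil => simp [pvScanB, pvTW]
  | cons o rest ih =>
    by_cases hle : o ≤ ep
    · have ho : ¬ o > ep := by omega
      have hne : ¬ (ks = ke + 1 - 1 ∧ o ≤ cs) := fun ⟨h1, _⟩ => by omega
      rw [pvScanB]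
      simp only [ho, if_false, hne, if_false]
      rw [ih (ke + 1) (by omega)]
      simp only [pvTW, List.takeWhile, hle, decide_true, List.length_cons, Prod.mk.injEq]
      push_cast
      exact ⟨trivial, by omega⟩
    · have ho : o > ep := by omega
      simp [pvScanB, ho, pvTW, List.takeWhile, hle]

theorem pvScanB_eq (cs ep : Int) (l : List Int) (m : Int) :
    pvScanB cs ep l m m = (m + (min (pvTW cs l) (pvTW ep l) : Int), m + (pvTW ep l : Int)) := by
  induction l generalizing m with
  | nil => simp [pvScanB, pvTW]
  | cons o rest ih =>
    by_cases hle : o ≤ ep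
    · have ho : ¬ o > ep := by omega
      have hE : pvTW ep (o :: rest) = pvTW ep rest + 1 := by
        simp [pvTW, List.takeWhile, hle]
      by_cases hc : o ≤ cs
      · have hS : pvTW cs (o :: rest) = pvTW cs rest + 1 := by
          simp [pvTW, List.takeWhile, hc]
        rw [pvScanB]
        simp only [ho, if_false]
        rw [if_pos ⟨by omega, hc⟩, ih (m + 1), hS, hE, Prod.mk.injEq]
        push_cast
        constructor <;> omega
      · have hS : pvTW cs (o :: rest) = 0 := by
          simp [pvTW, List.takeWhile, hc]
        rw [pvScanB]
        simp only [ho, if_false]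
        rw [if_neg (fun ⟨_, h2⟩ => hc h2),
            pvScanB_stuck cs ep rest m (m + 1) (by omega), hS, hE, Prod.mk.injEq]
        push_cast
        constructor <;> omega
    · have ho : o > ep := by omega
      have hE : pvTW ep (o :: rest) = 0 := by
        simp [pvTW, List.takeWhile, hle]
      rw [pvScanB, if_pos ho, hE, Prod.mk.injEq]
      push_cast
      constructor <;> omega

theorem pvTW_mono (a b : Int) (h : a ≤ b) (l : List Int) : pvTW a l ≤ pvTW b l := by
  induction l with
  | nil => simp [pvTW]
  | cons o rest ih =>
    by_cases ho : o ≤ a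
    · have hob : o ≤ b := le_trans ho h
      simp only [pvTW, List.takeWhile, ho, hob, decide_true, List.length_cons] at *
      omega
    · simp [pvTW, List.takeWhile, ho]

-- ===== VERDICT (by name: the statement is the Claim_ definition above) =====
theorem compute_pages_py_spec : Claim_equal_compute_pages_py := by
  intro cs ce po tl _
  show _ = _
  unfold compute_pages_py compute_pages_py_alt
  simp only []
  have hep : max (ce - 1) cs = if ce - 1 > cs then ce - 1 else cs := by
    split <;> omega
  set ep := if ce - 1 > cs then ce - 1 else cs with hepd
  have hcs_ep : cs ≤ ep := by rw [hepd]; split <;> omega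
  have hmono := pvTW_mono cs ep hcs_ep po
  rw [hep, pvScanB_eq cs ep po 0, pvScanA_eq, pvScanA_eq]
  by_cases h0 : po = []
  · simp [h0, pvTW]
  · simp only [h0, if_false]
    by_cases hsz : pvTW cs po = 0 <;> by_cases hez : pvTW ep po = 0 <;>
      simp only [hsz, hez, if_true, if_false, List.cons.injEq, and_true] <;>
      push_cast <;> constructor <;> omega
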